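-- pv_equiv track=rewrite | github.com/KATO-Hiro/AtCoder | ABC/abc451-abc500/abc454/d/main.py | f
-- ===== SOURCE A (Python) =====
-- def f(s):
--     stack = []
--
--     for si in s:
--         stack.append(si)
--
--         if len(stack) <= 3:
--             continue
--         if (
--             stack[-4] == "("
--             and stack[-3] == "x"
--             and stack[-2] == "x"
--             and stack[-1] == ")"
--         ):
--             for _ in range(4):
--                 stack.pop()
--
--             stack.append("x")
--             stack.append("x")
--
--     return "".join(stack)
-- ===== SOURCE B (Python) =====
-- def f(s):
--     # Right-to-left single pass over s. `out` holds the already-collapsed suffix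
--     # of s in reversed order; a "(xx)" redex is contracted the moment its "("
--     # arrives (the suffix then starts with "xx)", i.e. out ends with ")", "x", "x").
--     out = []
--     for c in reversed(s):
--         if c == "(" and out[-3:] == [")", "x", "x"]:
--             out[-3:] = ["x", "x"]
--         else:
--             out.append(c)
--     return "".join(reversed(out))
-- ===== Notes on version B (the rewrite author's own statement) =====
-- stated objective: alternative
-- what changed: Replaces A's left-to-right stack machine (append each char, test the top four with negative indexing, pop four and push two) with a single right-to-left pass over a reversed accumulator that contracts a redex the moment its opening paren arrives via slice assignment; equivalence rests on the proved order-independence of the reduction.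
import Mathlib
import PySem

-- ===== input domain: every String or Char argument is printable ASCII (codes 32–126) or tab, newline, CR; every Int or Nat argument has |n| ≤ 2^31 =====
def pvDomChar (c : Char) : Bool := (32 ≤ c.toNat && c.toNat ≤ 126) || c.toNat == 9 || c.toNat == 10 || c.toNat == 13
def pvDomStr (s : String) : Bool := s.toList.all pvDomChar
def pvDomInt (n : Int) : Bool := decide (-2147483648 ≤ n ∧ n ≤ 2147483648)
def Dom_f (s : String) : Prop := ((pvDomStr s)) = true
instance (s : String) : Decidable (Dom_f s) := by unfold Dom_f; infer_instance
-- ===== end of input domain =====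

-- B scans the string right-to-left, prepending characters and reducing each "(xx)" redex
-- as its "(" arrives, instead of A's left-to-right stack with append/pop (objective: alternative).

-- ===== PORT A =====
-- one iteration of A's for-loop body (state = the stack, in list order; append = ++ [si];
-- stack.pop() on the known-nonempty stack = dropLast, the popped value is unused)
def stepA (stack : List Char) (si : Char) : List Char :=
  let stack := stack ++ [si]
  if stack.length ≤ 3 then stack
  else if PySem.List.pyGet? stack (-4) = some '(' ∧ PySem.List.pyGet? stack (-3) = some 'x'
          ∧ PySem.List.pyGet? stack (-2) = some 'x' ∧ PySem.List.pyGet? stack (-1) = some ')' then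
    stack.dropLast.dropLast.dropLast.dropLast ++ ['x', 'x']
  else stack

def f (s : String) : String :=
  String.mk (s.toList.foldl stepA [])

-- ===== PORT B =====
-- one iteration of B's for-loop body (state = out, the collapsed suffix in reversed order;
-- out[-3:] and out[:-3] are PySem slices; the slice assignment out[-3:] = L is out[:-3] ++ L)
def stepB (out : List Char) (c : Char) : List Char :=
  if c = '(' ∧ PySem.List.slice out (some (-3)) none = [')', 'x', 'x'] then
    PySem.List.slice out none (some (-3)) ++ ['x', 'x']
  else out ++ [c]

def f_alt (s : String) : String :=
  String.mk ((s.toList.reverse.foldl stepB []).reverse)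

-- ===== PRECONDITION & SPEC =====
def Spec_f (s : String) (out : String) : Prop := out = f_alt s
instance (s : String) (out : String) : Decidable (Spec_f s out) := by unfold Spec_f; infer_instance

-- ===== CLAIM (what is proved, stated in full; the proofs are below) =====
def Claim_equal_f : Prop := ∀ (s : String), Dom_f s → Spec_f s (f s)

-- ===== LEMMAS AND PROOFS =====

-- B's loop step, rephrased on the suffix in string order (res = out.reverse)
def stepR (res : List Char) (c : Char) : List Char :=
  if c = '(' ∧ res.take 3 = ['x', 'x', ')'] then 'x' :: 'x' :: res.drop 3
  else c :: res

-- the normal form computed by B, as structural recursion (foldr form of B's fold)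
def nf : List Char → List Char
  | [] => []
  | c :: t => stepR (nf t) c

-- "contains no '(xx)' substring", stated structurally
def NoRedex : List Char → Prop
  | [] => True
  | c :: t => ¬(c = '(' ∧ t.take 3 = ['x', 'x', ')']) ∧ NoRedex t

theorem nf_eq_self_of_noRedex (l : List Char) (h : NoRedex l) : nf l = l := by
  induction l with
  | nil => rfl
  | cons c t ih =>
    obtain ⟨h1, h2⟩ := h
    simp only [nf, stepR, ih h2, if_neg h1]

-- contracting one redex anywhere does not change the normal form
theorem nf_step (a b : List Char) :
    nf (a ++ '(' :: 'x' :: 'x' :: ')' :: b) = nf (a ++ 'x' :: 'x' :: b) := by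
  induction a with
  | nil => simp [nf, stepR]
  | cons d a ih => simp only [List.cons_append, nf, ih]

-- A's loop body, characterised: either the stack ends in "(xx" and si = ')' and the
-- body contracts, or it just appends si
theorem last4_get (p : List Char) (a b e d : Char) :
    PySem.List.pyGet? (p ++ [a, b, e, d]) (-4) = some a ∧
    PySem.List.pyGet? (p ++ [a, b, e, d]) (-3) = some b ∧
    PySem.List.pyGet? (p ++ [a, b, e, d]) (-2) = some e ∧
    PySem.List.pyGet? (p ++ [a, b, e, d]) (-1) = some d := by
  refine ⟨?_, ?_, ?_, ?_⟩
  · rw [PySem.List.pyGet?_neg_ofNat _ 4 (by omega) (by simp)]; simp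
  · rw [PySem.List.pyGet?_neg_ofNat _ 3 (by omega) (by simp)]; simp
  · rw [PySem.List.pyGet?_neg_ofNat _ 2 (by omega) (by simp)]; simp
  · rw [PySem.List.pyGet?_neg_ofNat _ 1 (by omega) (by simp)]; simp

theorem dropLast4 (p : List Char) (a b e d : Char) :
    (p ++ [a, b, e, d]).dropLast.dropLast.dropLast.dropLast = p := by
  have h1 : p ++ [a, b, e, d] = (((p ++ [a]) ++ [b]) ++ [e]) ++ [d] := by simp
  rw [h1, List.dropLast_concat, List.dropLast_concat, List.dropLast_concat,
    List.dropLast_concat]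

theorem stepA_short (st : List Char) (c : Char) (h : st.length ≤ 2) :
    stepA st c = st ++ [c] := by
  simp only [stepA]
  rw [if_pos (by simp; omega)]

theorem stepA_cases (st : List Char) (c : Char) :
    (∃ pre, st = pre ++ ['(', 'x', 'x'] ∧ c = ')' ∧ stepA st c = pre ++ ['x', 'x']) ∨
    ((∀ pre, ¬(st = pre ++ ['(', 'x', 'x'] ∧ c = ')')) ∧ stepA st c = st ++ [c]) := by
  rcases hst : st.reverse with _ | ⟨r1, _ | ⟨r2, _ | ⟨r3, rest⟩⟩⟩
  · right
    have hl : st.length = 0 := by have := congrArg List.length hst; simpa using this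
    refine ⟨?_, stepA_short st c (by omega)⟩
    rintro pre ⟨he, -⟩
    have := congrArg List.length he
    simp at this; omega
  · right
    have hl : st.length = 1 := by have := congrArg List.length hst; simpa using this
    refine ⟨?_, stepA_short st c (by omega)⟩
    rintro pre ⟨he, -⟩
    have := congrArg List.length he
    simp at this; omega
  · right
    have hl : st.length = 2 := by have := congrArg List.length hst; simpa using this
    refine ⟨?_, stepA_short st c (by omega)⟩
    rintro pre ⟨he, -⟩
    have := congrArg List.length he
    simp at this; omega
  · -- st = rest.reverse ++ [r3, r2, r1]
    have hst' : st = rest.reverse ++ [r3, r2, r1] := by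
      have := congrArg List.reverse hst; simpa using this
    have hstack : st ++ [c] = rest.reverse ++ [r3, r2, r1, c] := by rw [hst']; simp
    obtain ⟨g4, g3, g2, g1⟩ := last4_get rest.reverse r3 r2 r1 c
    have hbody : stepA st c =
        if PySem.List.pyGet? (st ++ [c]) (-4) = some '(' ∧
            PySem.List.pyGet? (st ++ [c]) (-3) = some 'x' ∧
            PySem.List.pyGet? (st ++ [c]) (-2) = some 'x' ∧
            PySem.List.pyGet? (st ++ [c]) (-1) = some ')' then
          (st ++ [c]).dropLast.dropLast.dropLast.dropLast ++ ['x', 'x']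
        else st ++ [c] := by
      simp only [stepA]
      rw [if_neg (by rw [hstack]; simp)]
    rw [hstack] at hbody
    rw [g4, g3, g2, g1] at hbody
    by_cases hc : r3 = '(' ∧ r2 = 'x' ∧ r1 = 'x' ∧ c = ')'
    · left
      obtain ⟨h3, h2, h1, hcc⟩ := hc
      refine ⟨rest.reverse, by rw [hst', h3, h2, h1], hcc, ?_⟩
      rw [hbody, if_pos (by simp [h3, h2, h1, hcc]), dropLast4]
    · right
      refine ⟨?_, ?_⟩
      · rintro pre ⟨he, hcc⟩
        rw [hst'] at he
        have hlen : (pre : List Char).length = rest.reverse.length := by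
          have := congrArg List.length he; simp at this; simp; omega
        obtain ⟨-, h2⟩ := List.append_inj he (by omega)
        injection h2 with e3 h2; injection h2 with e2 h2; injection h2 with e1 _
        exact hc ⟨e3, e2, e1, hcc⟩
      · rw [hbody, if_neg (by simpa using hc), hstack]

theorem noRedex_contract (pre : List Char) (h : NoRedex (pre ++ ['(', 'x', 'x'])) :
    NoRedex (pre ++ ['x', 'x']) := by
  induction pre with
  | nil => simp [NoRedex]
  | cons d pre ih =>
    obtain ⟨h1, h2⟩ := h
    refine ⟨?_, ih h2⟩
    rintro ⟨hd, ht⟩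
    rcases pre with _ | ⟨p, _ | ⟨q, _ | ⟨r, t⟩⟩⟩ <;> simp_all [NoRedex]

theorem noRedex_append (st : List Char) (c : Char) (h : NoRedex st)
    (hend : ∀ pre, ¬(st = pre ++ ['(', 'x', 'x'] ∧ c = ')')) : NoRedex (st ++ [c]) := by
  induction st with
  | nil => simp [NoRedex]
  | cons d t ih =>
    obtain ⟨h1, h2⟩ := h
    refine ⟨?_, ih h2 ?_⟩
    · rintro ⟨hd, ht⟩
      rcases t with _ | ⟨t1, _ | ⟨t2, _ | ⟨t3, r⟩⟩⟩
      · simp at ht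
      · simp at ht
      · simp at ht
        exact hend [] ⟨by simp [hd, ht.1, ht.2.1], ht.2.2⟩
      · exact h1 ⟨hd, by simpa using ht⟩
    · rintro pre ⟨he, hc⟩
      exact hend (d :: pre) ⟨by rw [he]; rfl, hc⟩

theorem foldl_stepA_eq_nf (l : List Char) : ∀ st, NoRedex st →
    l.foldl stepA st = nf (st ++ l) := by
  induction l with
  | nil => intro st h; simpa using (nf_eq_self_of_noRedex st h).symm
  | cons c l ih =>
    intro st h
    rw [List.foldl_cons]
    rcases stepA_cases st c with ⟨pre, hpre, hc, hstep⟩ | ⟨hend, hstep⟩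
    · rw [hstep, ih _ (noRedex_contract pre (hpre ▸ h)), hpre, hc]
      have h1 : pre ++ ['(', 'x', 'x'] ++ ')' :: l = pre ++ '(' :: 'x' :: 'x' :: ')' :: l := by simp
      have h2 : pre ++ ['x', 'x'] ++ l = pre ++ 'x' :: 'x' :: l := by simp
      rw [h1, h2, nf_step]
    · rw [hstep, ih _ (noRedex_append st c h hend)]
      simp

theorem foldl_stepR_eq_nf (l : List Char) : l.reverse.foldl stepR [] = nf l := by
  rw [List.foldl_reverse]
  induction l with
  | nil => rfl
  | cons c t ih => simp only [List.foldr_cons, ih, nf]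

-- B's loop over the reversed accumulator is stepR over the accumulator in string order
theorem stepB_rev (out : List Char) (c : Char) :
    stepB out c = (stepR out.reverse c).reverse := by
  simp only [stepB, stepR]
  have h1 : PySem.List.slice out (some (-3)) none = out.drop (out.length - 3) := by
    simp [PySem.List.slice]
  have h2 : PySem.List.slice out none (some (-3)) = out.take (out.length - 3) := by
    simp [PySem.List.slice]
  rw [h1, h2]
  have hcond : (c = '(' ∧ out.drop (out.length - 3) = [')', 'x', 'x']) ↔
      (c = '(' ∧ out.reverse.take 3 = ['x', 'x', ')']) := by
    rw [List.take_reverse]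
    constructor
    · rintro ⟨hc, hd⟩; exact ⟨hc, by rw [hd]; rfl⟩
    · rintro ⟨hc, hd⟩
      refine ⟨hc, ?_⟩
      have := congrArg List.reverse hd
      simpa using this
  by_cases h : c = '(' ∧ out.reverse.take 3 = ['x', 'x', ')']
  · rw [if_pos (hcond.mpr h), if_pos h]
    simp only [List.reverse_cons]
    rw [List.drop_reverse]
    simp
  · rw [if_neg (fun hh => h (hcond.mp hh)), if_neg h]
    simp

theorem foldl_stepB_rev (l : List Char) : ∀ out : List Char,
    l.foldl stepB out = (l.foldl stepR out.reverse).reverse := by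
  induction l with
  | nil => intro out; simp
  | cons c l ih =>
    intro out
    rw [List.foldl_cons, List.foldl_cons, ih, stepB_rev, List.reverse_reverse]

-- ===== VERDICT (by name: the statement is the Claim_ definition above) =====
theorem f_spec : Claim_equal_f := by
  intro s _
  show f s = f_alt s
  unfold f f_alt
  rw [foldl_stepB_rev, List.reverse_nil, foldl_stepR_eq_nf, List.reverse_reverse,
    foldl_stepA_eq_nf _ [] trivial]
  rfl
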